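-- pv_equiv track=rewrite | github.com/MatthewJDavis/python | coin_toss.py | most_one_side_in_a_row
-- ===== SOURCE A (Python) =====
-- def most_one_side_in_a_row(item_list):
--     """ Calculate the most times each side appears in a list contiguously"""
--     heads_count = 0
--     tails_count = 0
--     max_heads_count = 0
--     max_tails_count = 0
--     current_item = ''
--     count = 0
--     for item in item_list:
--         current_item = item
--         count += 1
--         if current_item == 'Heads':
--             heads_count += count
--             if heads_count > max_heads_count:
--                 max_heads_count = heads_count
--                 tails_count = 0
--                 count = 0
--             count = 0
--             tails_count = 0
--         else:
--             tails_count += count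
--             if tails_count > max_tails_count:
--                 max_tails_count = tails_count
--                 heads_count = 0
--                 count = 0
--             count = 0
--             heads_count = 0
--
--     return max_heads_count, max_tails_count
-- ===== SOURCE B (Python) =====
-- def most_one_side_in_a_row(item_list):
--     """Calculate the most times each side appears in a list contiguously.
--
--     Run-at-a-time: scan each maximal run of equal side with an inner
--     advance, then update the matching maximum once per run."""
--     max_heads = 0
--     max_tails = 0
--     i = 0
--     n = len(item_list)
--     while i < n:
--         is_heads = item_list[i] == 'Heads'
--         j = i
--         while j < n and (item_list[j] == 'Heads') == is_heads:
--             j += 1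
--         if is_heads:
--             max_heads = max(max_heads, j - i)
--         else:
--             max_tails = max(max_tails, j - i)
--         i = j
--     return max_heads, max_tails
-- ===== Notes on version B (the rewrite author's own statement) =====
-- stated objective: alternative
-- what changed: B scans each maximal run of equal side at once (two-pointer run grouping, one max update per run) instead of A's per-element counters that are incremented and reset on every item.
import Mathlib
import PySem

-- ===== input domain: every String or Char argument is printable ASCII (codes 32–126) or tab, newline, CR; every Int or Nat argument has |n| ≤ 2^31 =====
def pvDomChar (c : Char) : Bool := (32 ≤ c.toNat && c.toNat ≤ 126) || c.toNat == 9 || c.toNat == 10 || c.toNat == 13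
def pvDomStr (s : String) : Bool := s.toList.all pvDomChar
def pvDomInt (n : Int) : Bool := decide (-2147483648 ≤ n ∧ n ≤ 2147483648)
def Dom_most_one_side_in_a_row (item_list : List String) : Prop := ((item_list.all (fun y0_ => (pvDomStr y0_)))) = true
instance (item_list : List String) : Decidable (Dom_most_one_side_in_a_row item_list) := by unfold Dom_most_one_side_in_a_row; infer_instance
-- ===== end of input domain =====

-- B groups each maximal run of equal side and updates one maximum per run, instead of A's
-- per-element counters; same cost, different structure (objective: alternative).

-- ===== PORT A =====
-- loop body of A; state: (heads_count, tails_count, max_heads_count, max_tails_count, current_item, count)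
def stepA (st : Int × Int × Int × Int × String × Int) (item : String) :
    Int × Int × Int × Int × String × Int :=
  let hc := st.1; let tc := st.2.1; let mh := st.2.2.1; let mt := st.2.2.2.1
  let cnt := st.2.2.2.2.2
  let current_item := item
  let cnt := cnt + 1
  if current_item == "Heads" then
    let hc := hc + cnt
    if hc > mh then (hc, 0, hc, mt, current_item, 0)
    else (hc, 0, mh, mt, current_item, 0)
  else
    let tc := tc + cnt
    if tc > mt then (0, tc, mh, tc, current_item, 0)
    else (0, tc, mh, mt, current_item, 0)

def most_one_side_in_a_row (item_list : List String) : Int × Int :=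
  let s := item_list.foldl stepA (0, 0, 0, 0, "", 0)
  (s.2.2.1, s.2.2.2.1)

-- ===== PORT B =====
-- the inner while loop of Source B (advance j over the current run) is the takeWhile/dropWhile split
def runsB : List String → List (Bool × Int)
  | [] => []
  | x :: xs =>
    let k := x == "Heads"
    (k, 1 + ((xs.takeWhile (fun y => (y == "Heads") == k)).length : Int)) ::
      runsB (xs.dropWhile (fun y => (y == "Heads") == k))
  termination_by l => l.length
  decreasing_by
    simpa using Nat.lt_succ_of_le (List.length_dropWhile_le _ _)

def most_one_side_in_a_row_alt (item_list : List String) : Int × Int :=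
  (runsB item_list).foldl
    (fun acc g => if g.1 then (max acc.1 g.2, acc.2) else (acc.1, max acc.2 g.2))
    (0, 0)

-- ===== PRECONDITION & SPEC =====
def Spec_most_one_side_in_a_row (item_list : List String) (out : Int × Int) : Prop := out = most_one_side_in_a_row_alt item_list
instance (item_list : List String) (out : Int × Int) : Decidable (Spec_most_one_side_in_a_row item_list out) := by unfold Spec_most_one_side_in_a_row; infer_instance

-- ===== CLAIM (what is proved, stated in full; the proofs are below) =====
def Claim_equal_most_one_side_in_a_row : Prop := ∀ (item_list : List String), Dom_most_one_side_in_a_row item_list → Spec_most_one_side_in_a_row item_list (most_one_side_in_a_row item_list)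

-- ===== LEMMAS AND PROOFS =====

-- runMax b c l: the eventual extra maximum contributed by l for side b, with current run carry c
def runMax (b : Bool) : Int → List String → Int
  | _, [] => 0
  | c, x :: xs => if (x == "Heads") = b then max (c + 1) (runMax b (c + 1) xs) else runMax b 0 xs

theorem runMax_nonneg (b : Bool) (l : List String) : ∀ c : Int, 0 ≤ runMax b c l := by
  induction l with
  | nil => intro c; simp [runMax]
  | cons x xs ih =>
    intro c
    by_cases h : (x == "Heads") = b
    · simp only [runMax, h, if_pos]
      exact le_trans (ih (c + 1)) (le_max_right _ _)
    · simp only [runMax, if_neg h]; exact ih 0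

-- consuming a maximal run of side b: one max with the run length (plus carry)
theorem runMax_hit (b : Bool) (t : List String) : ∀ (rest : List String) (c : Int) (y : String),
    (y == "Heads") = b → (∀ z ∈ t, (z == "Heads") = b) →
    (rest = [] ∨ ∃ r rs, rest = r :: rs ∧ (r == "Heads") ≠ b) → 0 ≤ c →
    runMax b c (y :: (t ++ rest)) = max (c + 1 + t.length) (runMax b 0 rest) := by
  induction t with
  | nil =>
    intro rest c y hy _ hrest hc
    simp only [List.nil_append, List.length_nil]
    rcases hrest with h | ⟨r, rs, hr, hne⟩
    · subst h; simp [runMax, hy]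
    · subst hr
      simp only [runMax, if_pos hy, if_neg hne]
      norm_num
  | cons z t' ih =>
    intro rest c y hy hall hrest hc
    have hz : (z == "Heads") = b := hall z (by simp)
    have hall' : ∀ w ∈ t', (w == "Heads") = b := fun w hw => hall w (by simp [hw])
    have step : runMax b c (y :: (z :: t' ++ rest)) =
        max (c + 1) (runMax b (c + 1) (z :: (t' ++ rest))) := by
      simp [runMax, hy]
    rw [step, ih rest (c + 1) z hz hall' hrest (by omega)]
    have h1 : max (c + 1) (c + 1 + 1 + (t'.length : Int)) = c + 1 + 1 + (t'.length : Int) :=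
      max_eq_right (by have := Int.natCast_nonneg t'.length; omega)
    rw [← max_assoc, h1]
    have h2 : c + 1 + 1 + (t'.length : Int) = c + 1 + ((z :: t').length : Int) := by
      push_cast [List.length_cons]; ring
    rw [h2]

-- consuming a run of the other side: no contribution to side b
theorem runMax_miss (b : Bool) (t : List String) : ∀ (rest : List String) (c : Int) (y : String),
    (y == "Heads") ≠ b → (∀ z ∈ t, (z == "Heads") ≠ b) →
    runMax b c (y :: (t ++ rest)) = runMax b 0 rest := by
  induction t with
  | nil => intro rest c y hy _; simp [runMax, hy]
  | cons z t' ih =>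
    intro rest c y hy hall
    have hz : (z == "Heads") ≠ b := hall z (by simp)
    have hall' : ∀ w ∈ t', (w == "Heads") ≠ b := fun w hw => hall w (by simp [hw])
    simp only [runMax, if_neg hy, List.cons_append]
    have := ih rest 0 z hz hall'
    simpa [runMax, if_neg hz] using this

-- B's fold over the run list computes both run maxima (fuel = a length bound)
theorem foldB_aux : ∀ (n : Nat) (l : List String), l.length ≤ n → ∀ (a bb : Int),
    0 ≤ a → 0 ≤ bb →
    (runsB l).foldl
      (fun acc g => if g.1 then (max acc.1 g.2, acc.2) else (acc.1, max acc.2 g.2)) (a, bb)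
    = (max a (runMax true 0 l), max bb (runMax false 0 l)) := by
  intro n
  induction n with
  | zero =>
    intro l hl a bb ha hbb
    have : l = [] := List.length_eq_zero_iff.mp (Nat.le_zero.mp hl)
    subst this
    simp [runsB, runMax, max_eq_left ha, max_eq_left hbb]
  | succ n ihn =>
    intro l hl a bb ha hbb
    match l with
    | [] => simp [runsB, runMax, max_eq_left ha, max_eq_left hbb]
    | x :: xs =>
      set k := x == "Heads" with hk
      set t := xs.takeWhile (fun y => (y == "Heads") == k) with ht
      set rest := xs.dropWhile (fun y => (y == "Heads") == k) with hr
      have hsplit : xs = t ++ rest := (List.takeWhile_append_dropWhile).symm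
      have hallt : ∀ z ∈ t, (z == "Heads") = k := by
        intro z hz
        have := List.mem_takeWhile_imp hz
        simpa using this
      have hrest : rest = [] ∨ ∃ r rs, rest = r :: rs ∧ (r == "Heads") ≠ k := by
        cases hd : rest with
        | nil => exact Or.inl rfl
        | cons r rs =>
          right
          refine ⟨r, rs, rfl, ?_⟩
          have hh := List.head?_dropWhile_not (fun y => (y == "Heads") == k) xs
          rw [← hr, hd] at hh
          simp at hh
          exact hh
      have hlen : rest.length ≤ n := by
        have h1 : rest.length ≤ xs.length := hr ▸ List.length_dropWhile_le _ _
        simp at hl; omega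
      have hunfold : runsB (x :: xs) = (k, 1 + (t.length : Int)) :: runsB rest := by
        rw [runsB]
      rw [hunfold, List.foldl_cons]
      by_cases hkk : k = true
      · simp only [hkk, if_pos]
        rw [ihn rest hlen (max a (1 + (t.length : Int))) bb
          (le_trans ha (le_max_left _ _)) hbb]
        have hy : (x == "Heads") = true := by rw [← hk]; exact hkk
        have hhit := runMax_hit true t rest 0 x hy
          (fun z hz => by rw [hallt z hz]; exact hkk)
          (by rcases hrest with h | ⟨r, rs, h1, h2⟩
              · exact Or.inl h
              · exact Or.inr ⟨r, rs, h1, by rw [hkk] at h2; exact h2⟩) le_rfl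
        have hmiss := runMax_miss false t rest 0 x (by simp [hy])
          (fun z hz => by rw [hallt z hz, hkk]; simp)
        have e1 : runMax true 0 (x :: xs) = max (0 + 1 + (t.length : Int)) (runMax true 0 rest) := by
          rw [hsplit]; exact hhit
        have e2 : runMax false 0 (x :: xs) = runMax false 0 rest := by
          rw [hsplit]; exact hmiss
        rw [e1, e2]
        refine Prod.ext ?_ rfl
        show max (max a (1 + (t.length:Int))) (runMax true 0 rest)
           = max a (max (0 + 1 + (t.length:Int)) (runMax true 0 rest))
        rw [max_assoc]
        norm_num
      · have hkk' : k = false := by simpa using hkk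
        simp only [hkk', Bool.false_eq_true, reduceIte]
        rw [ihn rest hlen a (max bb (1 + (t.length : Int))) ha
          (le_trans hbb (le_max_left _ _))]
        have hy : (x == "Heads") = false := by rw [← hk]; exact hkk'
        have hhit := runMax_hit false t rest 0 x hy
          (fun z hz => by rw [hallt z hz]; exact hkk')
          (by rcases hrest with h | ⟨r, rs, h1, h2⟩
              · exact Or.inl h
              · exact Or.inr ⟨r, rs, h1, by rw [hkk'] at h2; exact h2⟩) le_rfl
        have hmiss := runMax_miss true t rest 0 x (by simp [hy])
          (fun z hz => by rw [hallt z hz, hkk']; simp)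
        have e1 : runMax false 0 (x :: xs) = max (0 + 1 + (t.length : Int)) (runMax false 0 rest) := by
          rw [hsplit]; exact hhit
        have e2 : runMax true 0 (x :: xs) = runMax true 0 rest := by
          rw [hsplit]; exact hmiss
        rw [e1, e2]
        refine Prod.ext rfl ?_
        show max (max bb (1 + (t.length:Int))) (runMax false 0 rest)
           = max bb (max (0 + 1 + (t.length:Int)) (runMax false 0 rest))
        rw [max_assoc]
        norm_num

-- A's fold, with count = 0 entering every step, computes the same two maxima
theorem foldA_core (l : List String) : ∀ (hc tc mh mt : Int) (cur : String),
    0 ≤ hc → 0 ≤ tc → 0 ≤ mh → 0 ≤ mt →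
    ((l.foldl stepA (hc, tc, mh, mt, cur, 0)).2.2.1,
     (l.foldl stepA (hc, tc, mh, mt, cur, 0)).2.2.2.1)
    = (max mh (runMax true hc l), max mt (runMax false tc l)) := by
  induction l with
  | nil =>
    intro hc tc mh mt cur _ _ hmh hmt
    simp [runMax, max_eq_left hmh, max_eq_left hmt]
  | cons x xs ih =>
    intro hc tc mh mt cur hhc htc hmh hmt
    by_cases hx : (x == "Heads") = true
    · have hstep : stepA (hc, tc, mh, mt, cur, 0) x = (hc + 1, 0, max mh (hc + 1), mt, x, 0) := by
        simp only [stepA, hx, if_pos]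
        split_ifs with h
        · rw [max_eq_right (le_of_lt (by omega : mh < hc + 1))]; norm_num
        · rw [max_eq_left (by omega : hc + 1 ≤ mh)]; norm_num
      rw [List.foldl_cons, hstep,
        ih (hc + 1) 0 (max mh (hc + 1)) mt x (by omega) le_rfl
          (le_trans hmh (le_max_left _ _)) hmt]
      have eH : runMax true hc (x :: xs) = max (hc + 1) (runMax true (hc + 1) xs) := by
        simp [runMax, hx]
      have eT : runMax false tc (x :: xs) = runMax false 0 xs := by
        simp [runMax, hx]
      rw [eH, eT, ← max_assoc]
    · have hx' : (x == "Heads") = false := by simpa using hx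
      have hstep : stepA (hc, tc, mh, mt, cur, 0) x = (0, tc + 1, mh, max mt (tc + 1), x, 0) := by
        simp only [stepA, hx', Bool.false_eq_true, reduceIte]
        split_ifs with h
        · rw [max_eq_right (le_of_lt (by omega : mt < tc + 1))]; norm_num
        · rw [max_eq_left (by omega : tc + 1 ≤ mt)]; norm_num
      rw [List.foldl_cons, hstep,
        ih 0 (tc + 1) mh (max mt (tc + 1)) x le_rfl (by omega) hmh
          (le_trans hmt (le_max_left _ _))]
      have eH : runMax true hc (x :: xs) = runMax true 0 xs := by
        simp [runMax, hx']
      have eT : runMax false tc (x :: xs) = max (tc + 1) (runMax false (tc + 1) xs) := by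
        simp [runMax, hx']
      rw [eH, eT, ← max_assoc]

-- ===== VERDICT (by name: the statement is the Claim_ definition above) =====
theorem most_one_side_in_a_row_spec : Claim_equal_most_one_side_in_a_row := by
  intro l _
  unfold Spec_most_one_side_in_a_row most_one_side_in_a_row most_one_side_in_a_row_alt
  have hA := foldA_core l 0 0 0 0 "" le_rfl le_rfl le_rfl le_rfl
  have hB := foldB_aux l.length l le_rfl 0 0 le_rfl le_rfl
  simp only [max_eq_right (runMax_nonneg true l 0), max_eq_right (runMax_nonneg false l 0)]
    at hA hB
  rw [hB]
  exact hA
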